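-- pv_equiv track=rewrite | github.com/poonam46/Poonam_FBS_work | Python  Assignments/Assignment 8/Q11.py | armstrongNumberSum
-- ===== SOURCE A (Python) =====
-- def countOfDigits(num):
--     count = 0
--     while(num > 0 ):
--         digit = num % 10
--         count +=1
--         num = num // 10
--
--     return count
--
-- def armstrongNumberSum(num):
--     temp = num
--     sum = 0
--
--     cnt = countOfDigits(num)
--
--     while(temp > 0):
--         digit = temp % 10
--         sum = sum + (digit ** cnt)
--         temp = temp // 10
--
--     return sum
-- ===== SOURCE B (Python) =====
-- def armstrongNumberSum(num):
--     if num <= 0: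
--         return 0
--     s = str(num)
--     cnt = len(s)
--     return sum(int(c) ** cnt for c in s)
-- ===== Notes on version B (the rewrite author's own statement) =====
-- stated objective: idiomatic
-- what changed: Replaces A's two arithmetic division loops (count digits, then re-divide summing powers) with a decimal string representation: str(num), len() for the digit count, and one comprehension summing int(c)**cnt over the characters; non-positive input is guarded to give the same empty-sum result as A.
import Mathlib
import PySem

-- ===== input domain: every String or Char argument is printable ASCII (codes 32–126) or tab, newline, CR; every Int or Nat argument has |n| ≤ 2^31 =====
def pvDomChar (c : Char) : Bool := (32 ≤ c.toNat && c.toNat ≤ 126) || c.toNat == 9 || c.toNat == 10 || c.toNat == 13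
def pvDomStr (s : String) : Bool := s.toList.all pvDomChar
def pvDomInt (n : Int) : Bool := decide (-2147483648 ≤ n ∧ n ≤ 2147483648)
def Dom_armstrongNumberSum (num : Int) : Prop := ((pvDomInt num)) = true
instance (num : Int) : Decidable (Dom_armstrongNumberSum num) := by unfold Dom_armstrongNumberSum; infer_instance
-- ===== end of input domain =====

-- B replaces A's two arithmetic division loops (count digits, then re-divide summing powers)
-- with the decimal string representation: str(num), len() and one comprehension; same values.

-- ===== PORT A =====
-- while(num > 0): count += 1; num = num // 10
def countOfDigitsLoop (num count : Int) : Int :=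
  if num > 0 then countOfDigitsLoop (PySem.Int.floordiv num 10) (count + 1) else count
termination_by num.toNat
decreasing_by
  rw [PySem.Int.floordiv_eq_ediv_of_pos (by omega)]; omega

def countOfDigits (num : Int) : Int := countOfDigitsLoop num 0

-- while(temp > 0): sum += (temp % 10) ** cnt; temp = temp // 10
-- cnt = countOfDigits num ≥ 0 always, so 'digit ** cnt' is exactly 'digit ^ cnt.toNat'.
def armSumLoop (temp sum cnt : Int) : Int :=
  if temp > 0 then
    armSumLoop (PySem.Int.floordiv temp 10) (sum + (PySem.Int.mod temp 10) ^ cnt.toNat) cnt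
  else sum
termination_by temp.toNat
decreasing_by
  rw [PySem.Int.floordiv_eq_ediv_of_pos (by omega)]; omega

def armstrongNumberSum (num : Int) : Int :=
  armSumLoop num 0 (countOfDigits num)

-- ===== PORT B =====
-- if num <= 0: return 0; s = str(num); cnt = len(s); sum(int(c) ** cnt for c in s)
-- int(c) is ported as (PySem.Int.ofChars? [c]).getD 0; every character of str(num) for
-- num > 0 is a decimal digit, so ofChars? is 'some' there and the default is never used.
-- cnt = len(s) ≥ 0, so '** cnt' is exactly '^ cnt.toNat'.
def armstrongNumberSum_alt (num : Int) : Int :=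
  if num ≤ 0 then 0
  else
    let s := PySem.Int.toChars num
    let cnt := PySem.List.len s
    (s.map (fun c => ((PySem.Int.ofChars? [c]).getD 0) ^ cnt.toNat)).sum

-- ===== PRECONDITION & SPEC =====
def Spec_armstrongNumberSum (num : Int) (out : Int) : Prop := out = armstrongNumberSum_alt num
instance (num : Int) (out : Int) : Decidable (Spec_armstrongNumberSum num out) := by unfold Spec_armstrongNumberSum; infer_instance

-- ===== CLAIM =====
def Claim_equal_armstrongNumberSum : Prop := ∀ (num : Int), Dom_armstrongNumberSum num → Spec_armstrongNumberSum num (armstrongNumberSum num)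

-- ===== LEMMAS AND PROOFS =====
-- proof-side helper: the decimal digits of a natural number, least significant first
def ndigs (m : Nat) : List Nat :=
  if m = 0 then [] else m % 10 :: ndigs (m / 10)
decreasing_by exact Nat.div_lt_self (by omega) (by omega)

theorem ndigs_lt (m : Nat) : ∀ d ∈ ndigs m, d < 10 := by
  fun_induction ndigs m with
  | case1 => simp
  | case2 m h ih =>
      intro d hd
      rcases List.mem_cons.mp hd with h1 | h2
      · subst h1; omega
      · exact ih d h2

-- A's loops, characterised through ndigs on num.toNat
theorem countLoop_eq (num count : Int) :
    countOfDigitsLoop num count = count + (ndigs num.toNat).length := by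
  fun_induction countOfDigitsLoop num count with
  | case1 n c h ih =>
      rw [PySem.Int.floordiv_eq_ediv_of_pos (by omega : (0:Int) < 10)] at ih
      have hnd : ndigs n.toNat = n.toNat % 10 :: ndigs (n.toNat / 10) := by
        rw [ndigs, if_neg (by omega : ¬ n.toNat = 0)]
      have h1 : (n / 10).toNat = n.toNat / 10 := by omega
      rw [PySem.Int.floordiv_eq_ediv_of_pos (by omega : (0:Int) < 10), ih, h1, hnd]
      simp; omega
  | case2 n c h =>
      rw [ndigs, if_pos (by omega : n.toNat = 0)]; simp

theorem countOfDigits_eq (num : Int) :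
    countOfDigits num = ((ndigs num.toNat).length : Int) := by
  simpa [countOfDigits] using countLoop_eq num 0

theorem armSumLoop_eq (temp sum cnt : Int) :
    armSumLoop temp sum cnt
      = sum + ((ndigs temp.toNat).map (fun d => (Int.ofNat d) ^ cnt.toNat)).sum := by
  fun_induction armSumLoop temp sum cnt with
  | case1 t s h ih =>
      rw [PySem.Int.floordiv_eq_ediv_of_pos (by omega : (0:Int) < 10)] at ih
      have hnd : ndigs t.toNat = t.toNat % 10 :: ndigs (t.toNat / 10) := by
        rw [ndigs, if_neg (by omega : ¬ t.toNat = 0)]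
      have h1 : (t / 10).toNat = t.toNat / 10 := by omega
      have h2 : PySem.Int.mod t 10 = Int.ofNat (t.toNat % 10) := by
        rw [PySem.Int.mod_eq_emod_of_pos (by omega : (0:Int) < 10)]
        simp only [Int.ofNat_eq_natCast]; omega
      rw [PySem.Int.floordiv_eq_ediv_of_pos (by omega : (0:Int) < 10), ih, h1, hnd, h2]
      simp; ring
  | case2 t s h =>
      rw [ndigs, if_pos (by omega : t.toNat = 0)]; simp

-- toDigitsCore on positive input produces the reversed digit list
theorem toDigitsCore_eq (f : Nat) :
    ∀ (m : Nat) (acc : List Char), 0 < m → m < f →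
      Nat.toDigitsCore 10 f m acc = (ndigs m).reverse.map Nat.digitChar ++ acc := by
  induction f with
  | zero => intro m acc h1 h2; omega
  | succ f ih =>
      intro m acc h1 h2
      rw [Nat.toDigitsCore]
      by_cases h10 : m / 10 = 0
      · rw [if_pos h10, ndigs, if_neg (by omega), ndigs, if_pos h10]
        simp
      · have hd := Nat.div_lt_self h1 (by omega : 1 < 10)
        have hnd : ndigs m = m % 10 :: ndigs (m / 10) := by
          rw [ndigs, if_neg (by omega)]
        rw [if_neg h10, ih (m / 10) _ (by omega) (by omega), hnd]
        simp

-- int(digitChar d) parses back to d for decimal digits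
theorem ofChars_digitChar (d : Nat) (h : d < 10) :
    (PySem.Int.ofChars? [Nat.digitChar d]).getD 0 = Int.ofNat d := by
  interval_cases d <;> decide

theorem map_parse (k : Nat) (l : List Nat) (h : ∀ d ∈ l, d < 10) :
    (l.map Nat.digitChar).map (fun c => ((PySem.Int.ofChars? [c]).getD 0) ^ k)
      = l.map (fun d => (Int.ofNat d) ^ k) := by
  induction l with
  | nil => rfl
  | cons x xs ih =>
      rw [List.map_cons, List.map_cons, List.map_cons,
          ofChars_digitChar x (h x List.mem_cons_self),
          ih (fun d hd => h d (List.mem_cons_of_mem _ hd))]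

-- ===== VERDICT =====
theorem armstrongNumberSum_spec : Claim_equal_armstrongNumberSum := by
  intro num _
  show armstrongNumberSum num = armstrongNumberSum_alt num
  by_cases hpos : num ≤ 0
  · rw [armstrongNumberSum, armSumLoop, if_neg (by omega), armstrongNumberSum_alt, if_pos hpos]
  · push Not at hpos
    rw [armstrongNumberSum, armSumLoop_eq, countOfDigits_eq, armstrongNumberSum_alt,
        if_neg (by omega)]
    have hs : PySem.Int.toChars num = (ndigs num.toNat).reverse.map Nat.digitChar := by
      rw [PySem.Int.toChars, if_neg (by omega)]
      simpa using toDigitsCore_eq (num.toNat + 1) num.toNat [] (by omega) (by omega)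
    simp only [hs, PySem.List.len, List.length_map, List.length_reverse]
    rw [show ((((ndigs num.toNat).length : Int)).toNat) = (ndigs num.toNat).length by omega]
    rw [map_parse _ _ (fun d hd => ndigs_lt _ d (List.mem_reverse.mp hd)),
        List.map_reverse, List.sum_reverse]
    simp
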